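-- pv_equiv track=rewrite | github.com/DjangoWariors/TinlyLink | backend/apps/users/middleware.py | _parse_rate_limit
-- ===== SOURCE A (Python) =====
-- def _parse_rate_limit(rate_string):
--     """
--     Parse rate limit string like '60/minute' into config dict.
--     Returns None for 'unlimited'.
--     """
--     if rate_string == "unlimited":
--         return None
--
--     try:
--         limit_str, period = rate_string.split("/")
--         limit = int(limit_str)
--
--         # Convert period to seconds
--         period_map = {
--             "second": 1,
--             "minute": 60,
--             "hour": 3600,
--             "day": 86400,
--         }
--         # Handle periods like "15minutes"
--         for unit, seconds in period_map.items():
--             if period.endswith(unit):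
--                 multiplier = period[:-len(unit)] or "1"
--                 window = int(multiplier) * seconds if multiplier.isdigit() else seconds
--                 return {"limit": limit, "window": window}
--             elif period.endswith(unit + "s"):
--                 multiplier = period[:-len(unit)-1] or "1"
--                 window = int(multiplier) * seconds if multiplier.isdigit() else seconds
--                 return {"limit": limit, "window": window}
--
--         # Default to minute if unknown
--         return {"limit": limit, "window": 60}
--     except (ValueError, AttributeError):
--         return {"limit": 60, "window": 60}
-- ===== SOURCE B (Python) =====
-- _UNIT_BY_LAST = {"d": ("second", 1), "e": ("minute", 60), "r": ("hour", 3600), "y": ("day", 86400)}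
--
--
-- def _parse_rate_limit(rate_string):
--     if rate_string == "unlimited":
--         return None
--     try:
--         limit_str, period = rate_string.split("/")
--         limit = int(limit_str)
--         # drop at most one trailing plural marker, then dispatch on the unit's last letter
--         core = period[:-1] if period.endswith("s") else period
--         entry = _UNIT_BY_LAST.get(core[-1:])
--         if entry is not None:
--             unit, secs = entry
--             if core.endswith(unit):
--                 pre = core[:len(core) - len(unit)]
--                 window = (int(pre) if pre.isdigit() else 1) * secs
--                 return {"limit": limit, "window": window}
--         return {"limit": limit, "window": 60}
--     except (ValueError, AttributeError):
--         return {"limit": 60, "window": 60}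
-- ===== Notes on version B (the rewrite author's own statement) =====
-- stated objective: alternative
-- what changed: A scans the four period units in order testing two endswith variants per unit; B strips at most one trailing plural marker from the period and then dispatches directly on the unit's last letter via a dict keyed by that letter, so no scan over units remains.
import Mathlib
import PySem

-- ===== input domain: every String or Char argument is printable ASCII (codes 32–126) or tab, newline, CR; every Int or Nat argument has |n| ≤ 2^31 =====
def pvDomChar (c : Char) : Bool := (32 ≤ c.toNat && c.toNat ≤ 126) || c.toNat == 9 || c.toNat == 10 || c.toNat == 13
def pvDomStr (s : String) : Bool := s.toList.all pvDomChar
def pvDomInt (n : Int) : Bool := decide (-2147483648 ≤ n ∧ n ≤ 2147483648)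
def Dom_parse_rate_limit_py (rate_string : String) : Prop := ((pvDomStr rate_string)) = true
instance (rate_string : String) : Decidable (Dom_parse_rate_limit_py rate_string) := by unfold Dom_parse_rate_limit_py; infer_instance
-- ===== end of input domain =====

-- B replaces A's linear scan over the four period units by a single dispatch on the unit's
-- last letter after stripping at most one trailing plural marker (objective: alternative).

-- ===== PORT A =====
-- the window computation shared by both branches of A's loop body:
-- `int(multiplier) * seconds if multiplier.isdigit() else seconds`
-- (under isdigit, int() cannot raise on the ASCII domain; `.getD 0` is never reached there)
def pvWindow (multiplier : String) (seconds : Int) : Int :=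
  if PySem.Str.strIsdigit multiplier then ((PySem.Int.ofStr? multiplier).getD 0) * seconds
  else seconds

-- `multiplier = period[:-k] or "1"`
def pvMult (period : String) (k : Nat) : String :=
  let m := PySem.Str.slice period none (some (-(k : Int)))
  if m == "" then "1" else m

-- A's `for unit, seconds in period_map.items():` loop; returns the dict A returns
def pvLoopA (period : String) (limit : Int) : List (String × Int) → List (String × Int)
  | [] => [("limit", limit), ("window", 60)]
  | (unit, seconds) :: rest =>
    if PySem.Str.endswith period unit then
      [("limit", limit), ("window", pvWindow (pvMult period (PySem.Str.len unit).toNat) seconds)]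
    else if PySem.Str.endswith period (unit ++ "s") then
      [("limit", limit), ("window", pvWindow (pvMult period ((PySem.Str.len unit).toNat + 1)) seconds)]
    else pvLoopA period limit rest

def parse_rate_limit_py (rate_string : String) : Option (List (String × Int)) :=
  if rate_string == "unlimited" then none
  else some (
    match PySem.Str.split? rate_string "/" with
    | some [limit_str, period] =>
      match PySem.Int.ofStr? limit_str with
      | some limit =>
          pvLoopA period limit [("second", 1), ("minute", 60), ("hour", 3600), ("day", 86400)]
      | none => [("limit", 60), ("window", 60)]       -- ValueError from int(limit_str)
    | _ => [("limit", 60), ("window", 60)])           -- ValueError from tuple unpacking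

-- ===== PORT B =====
-- `(int(pre) if pre.isdigit() else 1) * secs` (under isdigit, int() cannot raise on ASCII)
def pvWindowAlt (pre : String) (secs : Int) : Int :=
  (if PySem.Str.strIsdigit pre then (PySem.Int.ofStr? pre).getD 0 else 1) * secs

def pvUnitByLast : PySem.Dict String (String × Int) := PySem.Dict.ofList
  [("d", ("second", (1:Int))), ("e", ("minute", 60)), ("r", ("hour", 3600)), ("y", ("day", 86400))]

def parse_rate_limit_py_alt (rate_string : String) : Option (List (String × Int)) :=
  if rate_string == "unlimited" then none
  else some (
    -- split? is always `some` for the non-empty separator "/"; `.getD []` only discharges the Option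
    match (PySem.Str.split? rate_string "/").getD [] with
    | [] => [("limit", 60), ("window", 60)]          -- ValueError: no piece
    | [_] => [("limit", 60), ("window", 60)]         -- ValueError: a single piece
    | limit_str :: period :: rest =>
      if rest = [] then
        match PySem.Int.ofStr? limit_str with
        | none => [("limit", 60), ("window", 60)]
        | some limit =>
          let core := if PySem.Str.endswith period "s"
                      then PySem.Str.slice period none (some (-1)) else period
          match PySem.Dict.get? pvUnitByLast (PySem.Str.slice core (some (-1)) none) with
          | some (unit, secs) =>
            if PySem.Str.endswith core unit then
              [("limit", limit), ("window",
                pvWindowAlt (PySem.Str.slice core none (some (PySem.Str.len core - PySem.Str.len unit))) secs)]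
            else [("limit", limit), ("window", 60)]
          | none => [("limit", limit), ("window", 60)]
      else [("limit", 60), ("window", 60)]        -- ValueError: more than two pieces
)

-- ===== PRECONDITION & SPEC =====
def Spec_parse_rate_limit_py (rate_string : String) (out : Option (List (String × Int))) : Prop := out = parse_rate_limit_py_alt rate_string
instance (rate_string : String) (out : Option (List (String × Int))) : Decidable (Spec_parse_rate_limit_py rate_string out) := by unfold Spec_parse_rate_limit_py; infer_instance

-- ===== CLAIM (what is proved, stated in full; the proofs are below) =====
def Claim_equal_parse_rate_limit_py : Prop := ∀ (rate_string : String), Dom_parse_rate_limit_py rate_string → Spec_parse_rate_limit_py rate_string (parse_rate_limit_py rate_string)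

-- ===== LEMMAS AND PROOFS =====

theorem pv_K {c : Char} : ∀ (P : List Char), [c] <:+ P ↔ P.drop (P.length - 1) = [c]
  | [] => by simp
  | a :: t => by
    cases t with
    | nil => simp [List.suffix_cons_iff, eq_comm]
    | cons b t' =>
      have h1 : (a :: b :: t').length - 1 = t'.length + 1 := by simp
      rw [h1, List.drop_succ_cons, List.suffix_cons_iff]
      have h2 : t'.length = (b :: t').length - 1 := by simp
      rw [h2, ← pv_K (b :: t')]
      simp

theorem pv_cons_prefix {c : Char} {l R : List Char} : (c :: l) <+: R ↔ [c] <+: R ∧ l <+: R.tail := by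
  cases R with
  | nil => simp
  | cons r R' => simp [List.cons_prefix_cons]

theorem pv_S1 {c : Char} {u P : List Char} :
    (u ++ [c]) <:+ P ↔ ([c] <:+ P ∧ u <:+ P.dropLast) := by
  rw [← List.reverse_prefix, ← List.reverse_prefix (l₁ := [c]), ← List.reverse_prefix (l₁ := u),
    List.reverse_append, ← List.tail_reverse]
  exact pv_cons_prefix

theorem pv_es (s u : String) : PySem.Str.endswith s u = true ↔ u.toList <:+ s.toList := by
  simp [PySem.Chars.endswith_iff]

theorem pv_core_toList (s : String) :
    (PySem.Str.slice s none (some (-1))).toList = s.toList.dropLast := by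
  simp [PySem.List.slice_to_neg_one]

theorem pv_key_toList (s : String) :
    (PySem.Str.slice s (some (-1)) none).toList = s.toList.drop (s.toList.length - 1) := by
  simp [PySem.List.slice_from_neg_one]

theorem pv_key_eq (s : String) (c : Char) (t : String) (ht : t.toList = [c])
    (h : [c] <:+ s.toList) : PySem.Str.slice s (some (-1)) none = t := by
  apply String.toList_inj.mp
  rw [pv_key_toList, (pv_K _).1 h, ht]

theorem pv_not_s (s : String) (c : Char) (hc : c ≠ 's') (h : [c] <:+ s.toList) :
    PySem.Str.endswith s "s" = false := by
  cases hB : PySem.Str.endswith s "s" with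
  | false => rfl
  | true =>
    have h1 := (pv_K _).1 ((by simpa using (pv_es s "s").1 hB) : ['s'] <:+ s.toList)
    have h2 := (pv_K _).1 h
    rw [h1] at h2
    simp at h2
    exact absurd h2.symm hc

theorem pv_slice_dropLast (s t : String) (k : Nat) (hk : 0 < k)
    (hcore : t.toList = s.toList.dropLast) :
    PySem.Str.slice s none (some (-((k+1 : Nat) : Int))) = PySem.Str.slice t none (some (-(k : Int))) := by
  apply String.toList_inj.mp
  simp only [PySem.Str.toList_slice, PySem.Chars.slice_eq_listSlice]
  rw [PySem.List.slice_to_neg_natCast s.toList (k+1) (by omega),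
    PySem.List.slice_to_neg_natCast t.toList k hk, hcore, List.dropLast_eq_take, List.take_take,
    List.length_take]
  congr 1
  omega

theorem pv_mult_dropLast (s t : String) (k : Nat) (hk : 0 < k)
    (hcore : t.toList = s.toList.dropLast) : pvMult s (k+1) = pvMult t k := by
  simp only [pvMult]
  rw [pv_slice_dropLast s t k hk hcore]

theorem pv_get_mem (k : String) (e : String × Int)
    (h : PySem.Dict.get? pvUnitByLast k = some e) :
    e.1 = "second" ∨ e.1 = "minute" ∨ e.1 = "hour" ∨ e.1 = "day" ∨ False := by
  rw [show pvUnitByLast = PySem.Dict.mk [("d", ("second", (1:Int))), ("e", ("minute", 60)),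
    ("r", ("hour", 3600)), ("y", ("day", 86400))] from by decide] at h
  simp only [PySem.Dict.get?_mk_cons] at h
  split_ifs at h <;> simp_all [PySem.Dict.get?] <;> simp [← h]

theorem pv_window_bridge (m : String) (secs : Int) :
    pvWindow (if m == "" then "1" else m) secs = pvWindowAlt m secs := by
  by_cases h : m == ""
  · have hm : m = "" := by simpa using h
    subst hm
    simp [pvWindow, pvWindowAlt, show PySem.Chars.strIsdigit ['1'] = true from by decide,
      show PySem.Chars.strIsdigit [] = false from by decide,
      show (PySem.Int.ofStr? "1").getD 0 = 1 from by decide]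
  · rw [if_neg h]
    unfold pvWindow pvWindowAlt
    by_cases hd : PySem.Str.strIsdigit m = true
    · rw [if_pos hd, if_pos hd]
    · rw [if_neg hd, if_neg hd, one_mul]

theorem pv_winmult (C u : String) (secs : Int) (hk : 0 < (PySem.Str.len u).toNat)
    (hle : (PySem.Str.len u).toNat ≤ C.toList.length) :
    pvWindow (pvMult C (PySem.Str.len u).toNat) secs
      = pvWindowAlt (PySem.Str.slice C none (some (PySem.Str.len C - PySem.Str.len u))) secs := by
  have hcast : ((PySem.Str.len u).toNat : Int) = PySem.Str.len u := by
    rw [PySem.Str.len_eq]; simp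
  have hm : PySem.Str.slice C none (some (-((PySem.Str.len u).toNat : Int)))
      = PySem.Str.slice C none (some (PySem.Str.len C - PySem.Str.len u)) := by
    apply String.toList_inj.mp
    simp only [PySem.Str.toList_slice, PySem.Chars.slice_eq_listSlice]
    rw [PySem.List.slice_to_neg_natCast C.toList ((PySem.Str.len u).toNat) hk,
      PySem.List.slice_to _ (by rw [PySem.Str.len_eq, ← hcast]; omega)]
    rw [PySem.Str.len_eq, PySem.Str.len_eq] at *
    congr 1
    omega
  simp only [pvMult]
  rw [hm, pv_window_bridge]

theorem pv_main (period : String) (limit : Int) :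
    pvLoopA period limit [("second", 1), ("minute", 60), ("hour", 3600), ("day", 86400)] =
    (let core := if PySem.Str.endswith period "s"
                 then PySem.Str.slice period none (some (-1)) else period
     match PySem.Dict.get? pvUnitByLast (PySem.Str.slice core (some (-1)) none) with
     | some (unit, secs) =>
       if PySem.Str.endswith core unit then
         [("limit", limit), ("window",
           pvWindowAlt (PySem.Str.slice core none (some (PySem.Str.len core - PySem.Str.len unit))) secs)]
       else [("limit", limit), ("window", 60)]
     | none => [("limit", limit), ("window", 60)]) := by
  simp only [pvLoopA]
  by_cases h_second : PySem.Str.endswith period "second" = true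
  · rw [if_pos h_second]
    have hU : String.toList "second" <:+ period.toList := (pv_es period "second").1 h_second
    have hc : ['d'] <:+ period.toList := List.IsSuffix.trans (by decide) hU
    have hns : PySem.Str.endswith period "s" = false := pv_not_s period 'd' (by decide) hc
    have hkey : PySem.Str.slice period (some (-1)) none = "d" := pv_key_eq period 'd' "d" (by decide) hc
    simp only [hns, Bool.false_eq_true, if_false, hkey]
    rw [show PySem.Dict.get? pvUnitByLast "d" = some ("second", 1) from by decide]
    simp only [h_second, if_true]
    rw [pv_winmult period "second" 1 (by decide) (by
      have h1 : ("second".toList).length ≤ period.toList.length := hU.length_le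
      have h2 : (PySem.Str.len "second").toNat = ("second".toList).length := by decide
      omega)]
  · rw [if_neg h_second]
    by_cases h_seconds : PySem.Str.endswith period ("second" ++ "s") = true
    · rw [if_pos h_seconds]
      have hUS : String.toList "second" ++ ['s'] <:+ period.toList := by
        have h0 := (pv_es period ("second" ++ "s")).1 h_seconds
        rwa [show ("second" ++ "s" : String).toList = String.toList "second" ++ ['s'] from by decide] at h0
      obtain ⟨hs1, hU⟩ := pv_S1.1 hUS
      have hs : PySem.Str.endswith period "s" = true := (pv_es period "s").2 (by simpa using hs1)
      simp only [hs, if_true]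
      have hcore : (PySem.Str.slice period none (some (-1))).toList = period.toList.dropLast := pv_core_toList period
      have hc : ['d'] <:+ (PySem.Str.slice period none (some (-1))).toList := by rw [hcore]; exact List.IsSuffix.trans (by decide) hU
      have hkey : PySem.Str.slice (PySem.Str.slice period none (some (-1))) (some (-1)) none = "d" := pv_key_eq _ 'd' "d" (by decide) hc
      rw [hkey]
      rw [show PySem.Dict.get? pvUnitByLast "d" = some ("second", 1) from by decide]
      have hcu : PySem.Str.endswith (PySem.Str.slice period none (some (-1))) "second" = true := (pv_es _ "second").2 (by rw [hcore]; exact hU)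
      simp only [hcu, if_true]
      rw [pv_mult_dropLast period _ (PySem.Str.len "second").toNat (by decide) hcore]
      rw [pv_winmult (PySem.Str.slice period none (some (-1))) "second" 1 (by decide) (by
        have h1 : ("second".toList).length ≤ (PySem.Str.slice period none (some (-1))).toList.length :=
          List.IsSuffix.length_le (by rw [hcore]; exact hU)
        have h2 : (PySem.Str.len "second").toNat = ("second".toList).length := by decide
        omega)]
    · rw [if_neg h_seconds]
      by_cases h_minute : PySem.Str.endswith period "minute" = true
      · rw [if_pos h_minute]
        have hU : String.toList "minute" <:+ period.toList := (pv_es period "minute").1 h_minute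
        have hc : ['e'] <:+ period.toList := List.IsSuffix.trans (by decide) hU
        have hns : PySem.Str.endswith period "s" = false := pv_not_s period 'e' (by decide) hc
        have hkey : PySem.Str.slice period (some (-1)) none = "e" := pv_key_eq period 'e' "e" (by decide) hc
        simp only [hns, Bool.false_eq_true, if_false, hkey]
        rw [show PySem.Dict.get? pvUnitByLast "e" = some ("minute", 60) from by decide]
        simp only [h_minute, if_true]
        rw [pv_winmult period "minute" 60 (by decide) (by
          have h1 : ("minute".toList).length ≤ period.toList.length := hU.length_le
          have h2 : (PySem.Str.len "minute").toNat = ("minute".toList).length := by decide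
          omega)]
      · rw [if_neg h_minute]
        by_cases h_minutes : PySem.Str.endswith period ("minute" ++ "s") = true
        · rw [if_pos h_minutes]
          have hUS : String.toList "minute" ++ ['s'] <:+ period.toList := by
            have h0 := (pv_es period ("minute" ++ "s")).1 h_minutes
            rwa [show ("minute" ++ "s" : String).toList = String.toList "minute" ++ ['s'] from by decide] at h0
          obtain ⟨hs1, hU⟩ := pv_S1.1 hUS
          have hs : PySem.Str.endswith period "s" = true := (pv_es period "s").2 (by simpa using hs1)
          simp only [hs, if_true]
          have hcore : (PySem.Str.slice period none (some (-1))).toList = period.toList.dropLast := pv_core_toList period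
          have hc : ['e'] <:+ (PySem.Str.slice period none (some (-1))).toList := by rw [hcore]; exact List.IsSuffix.trans (by decide) hU
          have hkey : PySem.Str.slice (PySem.Str.slice period none (some (-1))) (some (-1)) none = "e" := pv_key_eq _ 'e' "e" (by decide) hc
          rw [hkey]
          rw [show PySem.Dict.get? pvUnitByLast "e" = some ("minute", 60) from by decide]
          have hcu : PySem.Str.endswith (PySem.Str.slice period none (some (-1))) "minute" = true := (pv_es _ "minute").2 (by rw [hcore]; exact hU)
          simp only [hcu, if_true]
          rw [pv_mult_dropLast period _ (PySem.Str.len "minute").toNat (by decide) hcore]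
          rw [pv_winmult (PySem.Str.slice period none (some (-1))) "minute" 60 (by decide) (by
        have h1 : ("minute".toList).length ≤ (PySem.Str.slice period none (some (-1))).toList.length :=
          List.IsSuffix.length_le (by rw [hcore]; exact hU)
        have h2 : (PySem.Str.len "minute").toNat = ("minute".toList).length := by decide
        omega)]
        · rw [if_neg h_minutes]
          by_cases h_hour : PySem.Str.endswith period "hour" = true
          · rw [if_pos h_hour]
            have hU : String.toList "hour" <:+ period.toList := (pv_es period "hour").1 h_hour
            have hc : ['r'] <:+ period.toList := List.IsSuffix.trans (by decide) hU
            have hns : PySem.Str.endswith period "s" = false := pv_not_s period 'r' (by decide) hc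
            have hkey : PySem.Str.slice period (some (-1)) none = "r" := pv_key_eq period 'r' "r" (by decide) hc
            simp only [hns, Bool.false_eq_true, if_false, hkey]
            rw [show PySem.Dict.get? pvUnitByLast "r" = some ("hour", 3600) from by decide]
            simp only [h_hour, if_true]
            rw [pv_winmult period "hour" 3600 (by decide) (by
              have h1 : ("hour".toList).length ≤ period.toList.length := hU.length_le
              have h2 : (PySem.Str.len "hour").toNat = ("hour".toList).length := by decide
              omega)]
          · rw [if_neg h_hour]
            by_cases h_hours : PySem.Str.endswith period ("hour" ++ "s") = true
            · rw [if_pos h_hours]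
              have hUS : String.toList "hour" ++ ['s'] <:+ period.toList := by
                have h0 := (pv_es period ("hour" ++ "s")).1 h_hours
                rwa [show ("hour" ++ "s" : String).toList = String.toList "hour" ++ ['s'] from by decide] at h0
              obtain ⟨hs1, hU⟩ := pv_S1.1 hUS
              have hs : PySem.Str.endswith period "s" = true := (pv_es period "s").2 (by simpa using hs1)
              simp only [hs, if_true]
              have hcore : (PySem.Str.slice period none (some (-1))).toList = period.toList.dropLast := pv_core_toList period
              have hc : ['r'] <:+ (PySem.Str.slice period none (some (-1))).toList := by rw [hcore]; exact List.IsSuffix.trans (by decide) hU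
              have hkey : PySem.Str.slice (PySem.Str.slice period none (some (-1))) (some (-1)) none = "r" := pv_key_eq _ 'r' "r" (by decide) hc
              rw [hkey]
              rw [show PySem.Dict.get? pvUnitByLast "r" = some ("hour", 3600) from by decide]
              have hcu : PySem.Str.endswith (PySem.Str.slice period none (some (-1))) "hour" = true := (pv_es _ "hour").2 (by rw [hcore]; exact hU)
              simp only [hcu, if_true]
              rw [pv_mult_dropLast period _ (PySem.Str.len "hour").toNat (by decide) hcore]
              rw [pv_winmult (PySem.Str.slice period none (some (-1))) "hour" 3600 (by decide) (by
        have h1 : ("hour".toList).length ≤ (PySem.Str.slice period none (some (-1))).toList.length :=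
          List.IsSuffix.length_le (by rw [hcore]; exact hU)
        have h2 : (PySem.Str.len "hour").toNat = ("hour".toList).length := by decide
        omega)]
            · rw [if_neg h_hours]
              by_cases h_day : PySem.Str.endswith period "day" = true
              · rw [if_pos h_day]
                have hU : String.toList "day" <:+ period.toList := (pv_es period "day").1 h_day
                have hc : ['y'] <:+ period.toList := List.IsSuffix.trans (by decide) hU
                have hns : PySem.Str.endswith period "s" = false := pv_not_s period 'y' (by decide) hc
                have hkey : PySem.Str.slice period (some (-1)) none = "y" := pv_key_eq period 'y' "y" (by decide) hc
                simp only [hns, Bool.false_eq_true, if_false, hkey]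
                rw [show PySem.Dict.get? pvUnitByLast "y" = some ("day", 86400) from by decide]
                simp only [h_day, if_true]
                rw [pv_winmult period "day" 86400 (by decide) (by
                  have h1 : ("day".toList).length ≤ period.toList.length := hU.length_le
                  have h2 : (PySem.Str.len "day").toNat = ("day".toList).length := by decide
                  omega)]
              · rw [if_neg h_day]
                by_cases h_days : PySem.Str.endswith period ("day" ++ "s") = true
                · rw [if_pos h_days]
                  have hUS : String.toList "day" ++ ['s'] <:+ period.toList := by
                    have h0 := (pv_es period ("day" ++ "s")).1 h_days
                    rwa [show ("day" ++ "s" : String).toList = String.toList "day" ++ ['s'] from by decide] at h0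
                  obtain ⟨hs1, hU⟩ := pv_S1.1 hUS
                  have hs : PySem.Str.endswith period "s" = true := (pv_es period "s").2 (by simpa using hs1)
                  simp only [hs, if_true]
                  have hcore : (PySem.Str.slice period none (some (-1))).toList = period.toList.dropLast := pv_core_toList period
                  have hc : ['y'] <:+ (PySem.Str.slice period none (some (-1))).toList := by rw [hcore]; exact List.IsSuffix.trans (by decide) hU
                  have hkey : PySem.Str.slice (PySem.Str.slice period none (some (-1))) (some (-1)) none = "y" := pv_key_eq _ 'y' "y" (by decide) hc
                  rw [hkey]
                  rw [show PySem.Dict.get? pvUnitByLast "y" = some ("day", 86400) from by decide]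
                  have hcu : PySem.Str.endswith (PySem.Str.slice period none (some (-1))) "day" = true := (pv_es _ "day").2 (by rw [hcore]; exact hU)
                  simp only [hcu, if_true]
                  rw [pv_mult_dropLast period _ (PySem.Str.len "day").toNat (by decide) hcore]
                  rw [pv_winmult (PySem.Str.slice period none (some (-1))) "day" 86400 (by decide) (by
        have h1 : ("day".toList).length ≤ (PySem.Str.slice period none (some (-1))).toList.length :=
          List.IsSuffix.length_le (by rw [hcore]; exact hU)
        have h2 : (PySem.Str.len "day").toNat = ("day".toList).length := by decide
        omega)]
                · rw [if_neg h_days]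
                  -- no unit matches: both sides give the default 60-second window
                  by_cases hs : PySem.Str.endswith period "s" = true
                  · simp only [hs, if_true]
                    have hcore : (PySem.Str.slice period none (some (-1))).toList = period.toList.dropLast := pv_core_toList period
                    cases hg : PySem.Dict.get? pvUnitByLast (PySem.Str.slice (PySem.Str.slice period none (some (-1))) (some (-1)) none) with
                    | none => rfl
                    | some e =>
                      obtain ⟨u, secs⟩ := e
                      by_cases hesc : PySem.Str.endswith (PySem.Str.slice period none (some (-1))) u = true
                      swap
                      · simp only [Bool.not_eq_true] at hesc
                        simp only [hesc, Bool.false_eq_true, if_false]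
                      · exfalso
                        have hmem := pv_get_mem _ _ hg
                        have hU := (pv_es _ u).1 hesc
                        rcases hmem with hu | hmem
                        · apply h_seconds
                          apply (pv_es period ("second" ++ "s")).2
                          rw [show ("second" ++ "s" : String).toList = String.toList "second" ++ ['s'] from by decide]
                          refine pv_S1.2 ⟨(by simpa using (pv_es period "s").1 hs), ?_⟩
                          rw [show u = _ from hu] at hU; rwa [hcore] at hU
                        rcases hmem with hu | hmem
                        · apply h_minutes
                          apply (pv_es period ("minute" ++ "s")).2
                          rw [show ("minute" ++ "s" : String).toList = String.toList "minute" ++ ['s'] from by decide]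
                          refine pv_S1.2 ⟨(by simpa using (pv_es period "s").1 hs), ?_⟩
                          rw [show u = _ from hu] at hU; rwa [hcore] at hU
                        rcases hmem with hu | hmem
                        · apply h_hours
                          apply (pv_es period ("hour" ++ "s")).2
                          rw [show ("hour" ++ "s" : String).toList = String.toList "hour" ++ ['s'] from by decide]
                          refine pv_S1.2 ⟨(by simpa using (pv_es period "s").1 hs), ?_⟩
                          rw [show u = _ from hu] at hU; rwa [hcore] at hU
                        rcases hmem with hu | hmem
                        · apply h_days
                          apply (pv_es period ("day" ++ "s")).2
                          rw [show ("day" ++ "s" : String).toList = String.toList "day" ++ ['s'] from by decide]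
                          refine pv_S1.2 ⟨(by simpa using (pv_es period "s").1 hs), ?_⟩
                          rw [show u = _ from hu] at hU; rwa [hcore] at hU
                        exact hmem
                  · simp only [Bool.not_eq_true] at hs
                    simp only [hs, Bool.false_eq_true, if_false]
                    cases hg : PySem.Dict.get? pvUnitByLast (PySem.Str.slice period (some (-1)) none) with
                    | none => rfl
                    | some e =>
                      obtain ⟨u, secs⟩ := e
                      by_cases hesc : PySem.Str.endswith period u = true
                      swap
                      · simp only [Bool.not_eq_true] at hesc
                        simp only [hesc, Bool.false_eq_true, if_false]
                      · exfalso
                        have hmem := pv_get_mem _ _ hg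
                        have hU := (pv_es _ u).1 hesc
                        rcases hmem with hu | hmem
                        · exact h_second ((pv_es period "second").2 (by rw [← (show u = _ from hu)]; exact hU))
                        rcases hmem with hu | hmem
                        · exact h_minute ((pv_es period "minute").2 (by rw [← (show u = _ from hu)]; exact hU))
                        rcases hmem with hu | hmem
                        · exact h_hour ((pv_es period "hour").2 (by rw [← (show u = _ from hu)]; exact hU))
                        rcases hmem with hu | hmem
                        · exact h_day ((pv_es period "day").2 (by rw [← (show u = _ from hu)]; exact hU))
                        exact hmem

-- ===== VERDICT (by name: the statement is the Claim_ definition above) =====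
theorem parse_rate_limit_py_spec : Claim_equal_parse_rate_limit_py := by
  intro s _
  unfold Spec_parse_rate_limit_py parse_rate_limit_py parse_rate_limit_py_alt
  by_cases h : s == "unlimited"
  · simp [h]
  · cases hsp : PySem.Str.split? s "/" with
    | none => simp [h]
    | some parts =>
      match parts with
      | [] => simp [h]
      | [_] => simp [h]
      | _ :: _ :: _ :: _ => simp [h]
      | [l, p] =>
        cases hl : PySem.Int.ofStr? l with
        | none => simp [h, hl]
        | some limit => simp [h, hl, pv_main p limit]
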